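-- pv_equiv track=rewrite | github.com/cedricusureau/HLA_graph | src/write_svg.py | get_edges_dictionnary
-- ===== SOURCE A (Python) =====
-- def get_edges_dictionnary(svg_liste):
--     edges_ligne = {}
--     circle_ligne = {}
--     text_ligne = {}
--
--     for indice, ligne in enumerate(svg_liste):
--         if "<path" in ligne:
--             for i, j in enumerate(svg_liste[indice:]):
--                 if "class" in j:
--                     edges_ligne[
--                         svg_liste[indice + i].split("class=")[1].split('"')[1]
--                     ] = (int(indice) + i)
--                     break
--
--         if "<circle" in ligne:
--             for i, j in enumerate(svg_liste[indice:]):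
--                 if "class" in j:
--                     circle_ligne[
--                         svg_liste[indice + i].split("class=")[1].split('"')[1]
--                     ] = (int(indice) + i)
--                     break
--         if "<text" in ligne:
--             for i, j in enumerate(svg_liste[indice:]):
--                 if "class" in j:
--                     text_ligne[
--                         svg_liste[indice + i].split("class=")[1].split('"')[1]
--                     ] = (int(indice) + i)
--                     break
--     return edges_ligne, circle_ligne, text_ligne
-- ===== SOURCE B (Python) =====
-- def get_edges_dictionnary(svg_liste):
--     n = len(svg_liste)
--     # one backward pass: nxt[i] = (index, line) of first line at or after i containing "class"
--     nxt = [None] * n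
--     nearest = None
--     for i in range(n - 1, -1, -1):
--         if "class" in svg_liste[i]:
--             nearest = (i, svg_liste[i])
--         nxt[i] = nearest
--     edges_ligne = {}
--     circle_ligne = {}
--     text_ligne = {}
--     for i, ligne in enumerate(svg_liste):
--         if ("<path" in ligne or "<circle" in ligne or "<text" in ligne) and nxt[i] is not None:
--             j, cl = nxt[i]
--             key = cl.split("class=")[1].split('"')[1]
--             if "<path" in ligne:
--                 edges_ligne[key] = j
--             if "<circle" in ligne:
--                 circle_ligne[key] = j
--             if "<text" in ligne:
--                 text_ligne[key] = j
--     return edges_ligne, circle_ligne, text_ligne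
-- ===== Notes on version B (the rewrite author's own statement) =====
-- stated objective: alternative
-- what changed: Replaces A's forward rescan of the suffix for the first 'class' line at every tag line (done up to three times per line, worst-case quadratic) by a single backward pass precomputing a next-class-line suffix table, then one forward pass with O(1) lookup per line.
import Mathlib
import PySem

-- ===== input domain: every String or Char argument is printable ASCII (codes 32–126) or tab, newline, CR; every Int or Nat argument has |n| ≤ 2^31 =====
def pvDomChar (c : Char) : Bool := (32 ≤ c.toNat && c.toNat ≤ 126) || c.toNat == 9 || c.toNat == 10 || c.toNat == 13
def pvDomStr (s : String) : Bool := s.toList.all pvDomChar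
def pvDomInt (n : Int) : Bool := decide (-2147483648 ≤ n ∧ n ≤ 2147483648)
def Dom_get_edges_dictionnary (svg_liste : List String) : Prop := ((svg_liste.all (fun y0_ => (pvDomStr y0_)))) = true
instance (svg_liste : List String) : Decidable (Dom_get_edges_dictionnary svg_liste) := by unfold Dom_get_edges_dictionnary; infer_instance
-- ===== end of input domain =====

-- B replaces A's per-tag forward rescans of the suffix by one backward pass precomputing, for
-- each line, the first "class"-containing line at or after it (objective: alternative).


-- ===== PORT A =====
-- svg_liste[indice+i].split("class=")[1].split('"')[1]; the [1] indexings raise IndexError in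
-- Python on malformed lines — Pre_ excludes those inputs, here .getD stands in
def pvKeyA (s : String) : String :=
  ((PySem.Str.split? (((PySem.Str.split? s "class=").getD []).getD 1 "") "\"").getD []).getD 1 ""

-- the inner loop: 'for i, j in enumerate(svg_liste[indice:]): if "class" in j: …; break'
def pvFindA (idx : Int) : List String → Option (Int × String)
  | [] => none
  | j :: rest => if PySem.Str.isIn "class" j then some (idx, j) else pvFindA (idx + 1) rest

def pvUpdA (d : PySem.Dict String Int) (r : Option (Int × String)) : PySem.Dict String Int :=
  match r with
  | some (j, cl) => d.insert (pvKeyA cl) j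
  | none => d

def pvLoopA (idx : Int) (e c t : PySem.Dict String Int) :
    List String → PySem.Dict String Int × PySem.Dict String Int × PySem.Dict String Int
  | [] => (e, c, t)
  | ligne :: rest =>
      let e' := if PySem.Str.isIn "<path" ligne then pvUpdA e (pvFindA idx (ligne :: rest)) else e
      let c' := if PySem.Str.isIn "<circle" ligne then pvUpdA c (pvFindA idx (ligne :: rest)) else c
      let t' := if PySem.Str.isIn "<text" ligne then pvUpdA t (pvFindA idx (ligne :: rest)) else t
      pvLoopA (idx + 1) e' c' t' rest

def get_edges_dictionnary (svg_liste : List String) :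
    (List (String × Int)) × (List (String × Int)) × (List (String × Int)) :=
  let r := pvLoopA 0 .empty .empty .empty svg_liste
  (r.1.items, r.2.1.items, r.2.2.items)

-- ===== PORT B =====
def pvKeyB (s : String) : String :=
  ((PySem.Str.split? (((PySem.Str.split? s "class=").getD []).getD 1 "") "\"").getD []).getD 1 ""

-- backward pass: nxt[i] = (index, line) of the first "class" line at or after i
def pvNxtB (i : Int) : List String → List (Option (Int × String))
  | [] => []
  | l :: rest =>
      let tail := pvNxtB (i + 1) rest
      (if PySem.Str.isIn "class" l then some (i, l) else tail.headD none) :: tail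

def pvLoopB (e c t : PySem.Dict String Int) :
    List (String × Option (Int × String)) →
      PySem.Dict String Int × PySem.Dict String Int × PySem.Dict String Int
  | [] => (e, c, t)
  | (ligne, r) :: rest =>
      if PySem.Str.isIn "<path" ligne || PySem.Str.isIn "<circle" ligne || PySem.Str.isIn "<text" ligne then
        match r with
        | none => pvLoopB e c t rest
        | some (j, cl) =>
            let key := pvKeyB cl
            let e' := if PySem.Str.isIn "<path" ligne then e.insert key j else e
            let c' := if PySem.Str.isIn "<circle" ligne then c.insert key j else c
            let t' := if PySem.Str.isIn "<text" ligne then t.insert key j else t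
            pvLoopB e' c' t' rest
      else pvLoopB e c t rest

def get_edges_dictionnary_alt (svg_liste : List String) :
    (List (String × Int)) × (List (String × Int)) × (List (String × Int)) :=
  let r := pvLoopB .empty .empty .empty (svg_liste.zip (pvNxtB 0 svg_liste))
  (r.1.items, r.2.1.items, r.2.2.items)

-- ===== PRECONDITION & SPEC =====
-- a "class" line A extracts from must split as the Python expects (else IndexError)
def pvOkClass (s : String) : Bool :=
  decide (2 ≤ ((PySem.Str.split? s "class=").getD []).length) &&
  decide (2 ≤ ((PySem.Str.split? (((PySem.Str.split? s "class=").getD []).getD 1 "") "\"").getD []).length)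

-- Pre_ excludes exactly the inputs where Python A raises IndexError: some tag line's first
-- following "class" line does not contain 'class=…"…"…'.
def Pre_get_edges_dictionnary (svg_liste : List String) : Prop :=
  ∀ i ∈ List.range svg_liste.length, ∀ j ∈ List.range svg_liste.length, i ≤ j →
    (PySem.Str.isIn "<path" (svg_liste.getD i "") = true ∨
     PySem.Str.isIn "<circle" (svg_liste.getD i "") = true ∨
     PySem.Str.isIn "<text" (svg_liste.getD i "") = true) →
    PySem.Str.isIn "class" (svg_liste.getD j "") = true →
    (∀ k ∈ List.range svg_liste.length, i ≤ k → k < j →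
      PySem.Str.isIn "class" (svg_liste.getD k "") = false) →
    pvOkClass (svg_liste.getD j "") = true
instance (svg_liste : List String) : Decidable (Pre_get_edges_dictionnary svg_liste) := by
  unfold Pre_get_edges_dictionnary; infer_instance

def pvWitness_get_edges_dictionnary : List String :=
  ["<path d=1>", "x class=\"edge1\" y", "<circle r=2>", "<text class=\"t1\">", "plain"]

def Spec_get_edges_dictionnary (svg_liste : List String) (out : (List (String × Int)) × (List (String × Int)) × (List (String × Int))) : Prop := out = get_edges_dictionnary_alt svg_liste
instance (svg_liste : List String) (out : (List (String × Int)) × (List (String × Int)) × (List (String × Int))) : Decidable (Spec_get_edges_dictionnary svg_liste out) := by unfold Spec_get_edges_dictionnary; infer_instance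

-- ===== CLAIM (what is proved, stated in full; the proofs are below) =====
def Claim_equal_get_edges_dictionnary : Prop := ∀ (svg_liste : List String), Dom_get_edges_dictionnary svg_liste → Pre_get_edges_dictionnary svg_liste → Spec_get_edges_dictionnary svg_liste (get_edges_dictionnary svg_liste)

-- ===== LEMMAS AND PROOFS =====
lemma pvNxtB_headD (ls : List String) : ∀ i : Int, ((pvNxtB i ls).head?).getD none = pvFindA i ls := by
  induction ls with
  | nil => intro i; simp [pvNxtB, pvFindA]
  | cons l rest ih =>
      intro i
      simp only [pvNxtB, pvFindA]
      by_cases h : PySem.Str.isIn "class" l <;> simp at h <;>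
        simp [h, ih]

lemma pvLoop_eq (ls : List String) :
    ∀ (i : Int) (e c t : PySem.Dict String Int),
      pvLoopB e c t (ls.zip (pvNxtB i ls)) = pvLoopA i e c t ls := by
  induction ls with
  | nil => intro i e c t; simp [pvNxtB, pvLoopA, pvLoopB]
  | cons l rest ih =>
      intro i e c t
      have hzip : (l :: rest).zip (pvNxtB i (l :: rest)) =
          (l, pvFindA i (l :: rest)) :: rest.zip (pvNxtB (i + 1) rest) := by
        simp only [pvNxtB, pvFindA, List.zip_cons_cons]
        by_cases h : PySem.Str.isIn "class" l <;> simp at h <;>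
          simp [h, pvNxtB_headD]
      rw [hzip]
      by_cases hp : PySem.Str.isIn "<path" l <;>
      by_cases hc : PySem.Str.isIn "<circle" l <;>
      by_cases ht : PySem.Str.isIn "<text" l <;>
      simp at hp hc ht <;>
      rcases hr : pvFindA i (l :: rest) with _ | ⟨j, cl⟩ <;>
        simp [pvLoopA, pvLoopB, pvUpdA, pvKeyA, pvKeyB, hp, hc, ht, hr, ih]

-- ===== VERDICT (by name: the statement is the Claim_ definition above) =====
theorem get_edges_dictionnary_spec : Claim_equal_get_edges_dictionnary := by
  intro svg _ _
  unfold Spec_get_edges_dictionnary get_edges_dictionnary get_edges_dictionnary_alt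
  rw [pvLoop_eq]
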